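-- pv_equiv track=rewrite | github.com/squishyjs/daily-solve | Python/akashDinner.py | solve
-- ===== SOURCE A (Python) =====
-- def solve(n_items: int, k_distinct: int, dish_categories: list[int], cook_time: list[int]) -> int:
--
--     # edge case
--     if (len(set(dish_categories)) < k_distinct):
--         return -1
--
--     count: int = 0
--     menu_choice = dict()
--     for dish, cooking in zip(dish_categories, cook_time):
--         menu_choice.setdefault(dish, float('inf'))
--         menu_choice[dish] = min(menu_choice[dish], cooking)
--
--     choice_list = [(x, y) for x, y in menu_choice.items()]
--     choice_list.sort(key=lambda x: x[1])
--
--     result = 0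
--     for i in range(k_distinct):
--         result += choice_list[i][1]
--
--     return result
-- ===== SOURCE B (Python) =====
-- def solve(n_items: int, k_distinct: int, dish_categories: list[int], cook_time: list[int]) -> int:
--     # Not enough distinct categories: impossible.
--     if len(set(dish_categories)) < k_distinct:
--         return -1
--     # Greedy over all dishes sorted by cook time: the first time a category
--     # appears in this order its time is that category's minimum, and the first
--     # k categories encountered give the k smallest minima.
--     total = 0
--     remaining = k_distinct
--     seen = set()
--     for cat, t in sorted(zip(dish_categories, cook_time), key=lambda p: p[1]):
--         if remaining <= 0:
--             break
--         if cat not in seen: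
--             seen.add(cat)
--             total += t
--             remaining -= 1
--     return total
-- ===== Notes on version B (the rewrite author's own statement) =====
-- stated objective: alternative
-- what changed: A aggregates a per-category running-minimum dict, sorts the m (category, min) pairs by value and sums the first k; B never computes per-category minima at all: it sorts all n (category, time) pairs by time once and greedily scans them, adding a dish's time the first time its category appears and stopping after k picks.
-- outside the precondition, e.g. on solve(3, 2, [1, 2, 3], [5]): A raises IndexError, B returns 5
import Mathlib
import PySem

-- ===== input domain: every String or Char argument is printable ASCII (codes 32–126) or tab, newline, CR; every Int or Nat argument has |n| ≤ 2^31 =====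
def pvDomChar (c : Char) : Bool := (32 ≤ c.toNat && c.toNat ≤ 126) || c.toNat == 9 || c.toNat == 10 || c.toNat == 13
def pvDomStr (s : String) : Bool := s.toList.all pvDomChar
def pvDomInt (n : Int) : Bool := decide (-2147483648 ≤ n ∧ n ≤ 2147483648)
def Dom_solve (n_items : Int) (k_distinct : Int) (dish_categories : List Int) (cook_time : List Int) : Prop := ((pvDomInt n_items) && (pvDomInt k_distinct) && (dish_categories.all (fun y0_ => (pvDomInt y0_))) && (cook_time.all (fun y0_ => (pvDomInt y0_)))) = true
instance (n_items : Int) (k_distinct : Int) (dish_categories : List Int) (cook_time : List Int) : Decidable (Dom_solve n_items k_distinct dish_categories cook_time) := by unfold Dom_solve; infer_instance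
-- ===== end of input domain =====

-- B replaces A's per-category running-minimum dict + sort of the (category, min) pairs by a single sort
-- of ALL (category, time) pairs by time followed by a greedy scan that picks the first unseen category
-- each time and stops after k picks (alternative algorithm; no speed claim).

-- ===== PORT A =====
def solve (n_items : Int) (k_distinct : Int) (dish_categories : List Int) (cook_time : List Int) : Int :=
  if ((PySem.Set.ofList dish_categories).length : Int) < k_distinct then -1
  else
    -- "menu_choice.setdefault(dish, float('inf')); menu_choice[dish] = min(menu_choice[dish], cooking)":
    -- the float sentinel inf exists only transiently — on an absent key min(inf, cooking) = cooking, which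
    -- is the 'none' branch below; on a present (Int) key it is min v cooking. Exact for integer cook times.
    let menu_choice : PySem.Dict Int Int :=
      (dish_categories.zip cook_time).foldl
        (fun d p => d.insert p.1 (match d.get? p.1 with
                                  | none => p.2
                                  | some v => min v p.2))
        PySem.Dict.empty
    let choice_list := PySem.List.sorted menu_choice.items (fun x => x.2)
    (PySem.List.pyRange 0 k_distinct).foldl
      (fun result i => result + ((PySem.List.pyGet? choice_list i).map (fun p => p.2)).getD 0) 0
      -- pyGet? is none exactly where Python's choice_list[i] raises IndexError; Pre_solve excludes that.

-- ===== PORT B =====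
-- the 'for cat, t in sorted(...)' loop with its break: structural recursion carrying remaining and seen;
-- the running total is the value returned along the recursion
def scanPick : List (Int × Int) → Int → PySem.Set Int → Int
  | [], _, _ => 0
  | p :: rest, remaining, seen =>
      if remaining ≤ 0 then 0
      else if PySem.Set.contains seen p.1 then scanPick rest remaining seen
      else p.2 + scanPick rest (remaining - 1) (PySem.Set.add seen p.1)

def solve_alt (n_items : Int) (k_distinct : Int) (dish_categories : List Int) (cook_time : List Int) : Int :=
  if ((PySem.Set.ofList dish_categories).length : Int) < k_distinct then -1
  else
    scanPick (PySem.List.sorted (dish_categories.zip cook_time) (fun p => p.2))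
      k_distinct PySem.Set.empty

-- ===== PRECONDITION & SPEC =====
-- Pre_solve excludes exactly the inputs where A raises IndexError: cook_time shorter than dish_categories,
-- with enough distinct categories in the full list to pass the -1 check but fewer distinct categories in
-- the zipped prefix than k_distinct.
def Pre_solve (n_items : Int) (k_distinct : Int) (dish_categories : List Int) (cook_time : List Int) : Prop :=
  ((PySem.Set.ofList dish_categories).length : Int) < k_distinct ∨
  k_distinct ≤ ((PySem.Set.ofList ((dish_categories.zip cook_time).map (fun p => p.1))).length : Int)
instance (n_items : Int) (k_distinct : Int) (dish_categories : List Int) (cook_time : List Int) : Decidable (Pre_solve n_items k_distinct dish_categories cook_time) := by unfold Pre_solve; infer_instance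

def pvWitness_solve : Int × Int × List Int × List Int := (4, 2, [1, 2, 1, 3], [5, 3, 2, 4])

def Spec_solve (n_items : Int) (k_distinct : Int) (dish_categories : List Int) (cook_time : List Int) (out : Int) : Prop := out = solve_alt n_items k_distinct dish_categories cook_time
instance (n_items : Int) (k_distinct : Int) (dish_categories : List Int) (cook_time : List Int) (out : Int) : Decidable (Spec_solve n_items k_distinct dish_categories cook_time out) := by unfold Spec_solve; infer_instance

-- ===== CLAIM (what is proved, stated in full; the proofs are below) =====
def Claim_equal_solve : Prop := ∀ (n_items : Int) (k_distinct : Int) (dish_categories : List Int) (cook_time : List Int), Dom_solve n_items k_distinct dish_categories cook_time → Pre_solve n_items k_distinct dish_categories cook_time → Spec_solve n_items k_distinct dish_categories cook_time (solve n_items k_distinct dish_categories cook_time)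

-- ===== LEMMAS AND PROOFS =====

-- Option-valued running minimum: the value A's dict loop keeps for one key
def omin : Option Int → Int → Int
  | none, t => t
  | some v, t => min v t

theorem fold_get? (L : List (Int × Int)) (d : PySem.Dict Int Int) (c : Int) :
    ((L.foldl (fun d p => d.insert p.1 (match d.get? p.1 with
                                        | none => p.2
                                        | some v => min v p.2)) d).get? c)
      = (L.filter (fun p => p.1 == c)).foldl (fun o p => some (omin o p.2)) (d.get? c) := by
  induction L generalizing d with
  | nil => rfl
  | cons q rest ih =>
      simp only [List.foldl_cons, List.filter_cons]
      by_cases hc : q.1 = c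
      · simp only [hc, beq_self_eq_true, if_pos, List.foldl_cons]
        rw [ih]
        congr 1
        rw [PySem.Dict.get?_insert, if_pos rfl]
        cases d.get? c <;> simp [omin]
      · have hb : (q.1 == c) = false := by simpa using hc
        simp only [hb, Bool.false_eq_true, ite_false]
        rw [ih]
        congr 1
        rw [PySem.Dict.get?_insert, if_neg (fun h => hc h.symm)]

theorem opt_fold (fl : List (Int × Int)) (v : Int) :
    fl.foldl (fun o p => some (omin o p.2)) (some v)
      = some ((fl.map (fun p => p.2)).foldl min v) := by
  induction fl generalizing v with
  | nil => rfl
  | cons q rest ih => simp only [List.foldl_cons, List.map_cons, omin]; exact ih _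

-- the per-category minimum value, as A's dict stores it and as B's greedy scan produces it
def gmin (l : List (Int × Int)) (c : Int) : Int :=
  (PySem.List.min? ((l.filter (fun q => q.1 == c)).map (fun q => q.2)) (fun y => y)).getD 0

-- A's per-key dict value = the per-category minimum
theorem getD_min (L : List (Int × Int)) (c : Int) (hc : c ∈ L.map (fun p => p.1)) :
    (L.foldl (fun d p => d.insert p.1 (match d.get? p.1 with
                                       | none => p.2
                                       | some v => min v p.2)) PySem.Dict.empty).getD c 0
      = gmin L c := by
  have hfil : L.filter (fun q => q.1 == c) ≠ [] := by
    obtain ⟨p, hp, hpc⟩ := List.mem_map.mp hc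
    intro hnil
    have hmem : p ∈ L.filter (fun q => q.1 == c) := List.mem_filter.mpr ⟨hp, by simp [hpc]⟩
    simp [hnil] at hmem
  rcases hq : L.filter (fun q => q.1 == c) with _ | ⟨q, rest⟩
  · exact absurd hq hfil
  · rw [PySem.Dict.getD_eq_get?_getD, fold_get?, PySem.Dict.get?_empty, hq]
    unfold gmin
    rw [hq]
    simp only [List.foldl_cons, List.map_cons]
    have h0 : (some (omin none q.2)) = some q.2 := rfl
    rw [h0, opt_fold, PySem.List.min?_id_cons]

-- mapping snd over a sort by snd = sorting the snds
theorem sorted_map_snd (l : List (Int × Int)) :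
    (PySem.List.sorted l (fun p => p.2)).map (fun p => p.2)
      = PySem.List.sorted (l.map (fun p => p.2)) (fun y => y) := by
  apply PySem.List.eq_of_perm_of_pairwise_le_of_injective (fun y : Int => y) (fun a b h => h)
  · exact ((PySem.List.sorted_perm l (fun p => p.2) false).map _).trans
      (PySem.List.sorted_perm _ _ false).symm
  · rw [List.pairwise_map, List.pairwise_iff_getElem]
    intro i j hi hj hij
    exact PySem.List.key_sorted_getElem_mono l (fun p => p.2) (le_of_lt hij) hj
  · rw [List.pairwise_iff_getElem]
    intro i j hi hj hij
    exact PySem.List.sorted_id_getElem_mono _ (le_of_lt hij) hj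

theorem pyRange_nonpos {k : Int} (h : k ≤ 0) : PySem.List.pyRange 0 k 1 = [] := by
  rcases hE : PySem.List.pyRange 0 k 1 with _ | ⟨x, t⟩
  · rfl
  · exfalso
    have hx : x ∈ PySem.List.pyRange 0 k 1 := by rw [hE]; exact List.mem_cons_self
    rw [PySem.List.mem_pyRange_one] at hx; omega

-- A's indexed range loop sums the first n snds
theorem rangeSum (xs : List (Int × Int)) (n : Nat) (h : n ≤ xs.length) :
    (PySem.List.pyRange 0 (n : Int) 1).foldl
      (fun r i => r + ((PySem.List.pyGet? xs i).map (fun p => p.2)).getD 0) 0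
      = ((xs.take n).map (fun p => p.2)).sum := by
  induction n with
  | zero =>
      rw [show ((0 : Nat) : Int) = 0 from rfl, pyRange_nonpos le_rfl]
      simp
  | succ m ih =>
      have hc : ((m + 1 : Nat) : Int) = (m : Int) + 1 := by push_cast; ring
      have hm : m < xs.length := by omega
      rw [hc, PySem.List.pyRange_one_succ_right (by positivity), List.foldl_append,
        ih (by omega), List.take_succ, List.getElem?_eq_getElem hm]
      simp [List.getElem?_eq_getElem hm]
      have hm' : m < (List.map (fun p : Int × Int => p.2) xs).length := by simpa using hm
      rw [List.take_succ, List.getElem?_eq_getElem hm']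
      simp

-- the values B's scan picks when the budget never runs out: first occurrence of each unseen category
def pickAll : List (Int × Int) → PySem.Set Int → List Int
  | [], _ => []
  | p :: rest, seen =>
      if PySem.Set.contains seen p.1 then pickAll rest seen
      else p.2 :: pickAll rest (PySem.Set.add seen p.1)

-- B's scan = sum of the first (remaining) picked values
theorem scanPick_eq (l : List (Int × Int)) (remaining : Int) (seen : PySem.Set Int) :
    scanPick l remaining seen = ((pickAll l seen).take remaining.toNat).sum := by
  induction l generalizing remaining seen with
  | nil => simp [scanPick, pickAll]
  | cons p rest ih =>
      by_cases hr : remaining ≤ 0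
      · have h0 : remaining.toNat = 0 := by omega
        simp [scanPick, hr, h0]
      · by_cases hc : PySem.Set.contains seen p.1
        · simp only [scanPick, pickAll, if_neg hr, hc, ite_true]
          exact ih remaining seen
        · have ht : remaining.toNat = (remaining - 1).toNat + 1 := by omega
          simp only [scanPick, pickAll, if_neg hr, hc, Bool.false_eq_true, ite_false]
          rw [ih, ht, List.take_succ_cons, List.sum_cons]

theorem pickAll_sublist (l : List (Int × Int)) (seen : PySem.Set Int) :
    (pickAll l seen).Sublist (l.map (fun p => p.2)) := by
  induction l generalizing seen with
  | nil => simp [pickAll]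
  | cons p rest ih =>
      by_cases hc : PySem.Set.contains seen p.1
      · simp only [pickAll, hc, if_pos, List.map_cons]
        exact (ih seen).cons _
      · simp only [pickAll, hc, List.map_cons, Bool.false_eq_true, ite_false]
        exact (ih _).cons₂ _

-- the distinct categories of l that are not yet seen, in first-occurrence order
def keysOf (l : List (Int × Int)) (seen : PySem.Set Int) : List Int :=
  (PySem.List.dedup (l.map (fun p => p.1))).filter (fun c => !PySem.Set.contains seen c)

theorem mem_keysOf (l : List (Int × Int)) (seen : PySem.Set Int) (c : Int) :
    c ∈ keysOf l seen ↔ c ∈ l.map (fun p => p.1) ∧ c ∉ seen := by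
  unfold keysOf
  simp [List.mem_filter, PySem.Set.contains_eq_decide, PySem.List.dedup]

theorem nodup_keysOf (l : List (Int × Int)) (seen : PySem.Set Int) : (keysOf l seen).Nodup :=
  (PySem.List.nodup_dedup _).filter _

-- on a list sorted by snd, the values picked by the greedy scan are exactly the per-category minima
-- of the unseen categories (as a multiset)
theorem pickAll_perm (l : List (Int × Int)) (seen : PySem.Set Int)
    (hs : l.Pairwise (fun p q => p.2 ≤ q.2)) :
    (pickAll l seen).Perm ((keysOf l seen).map (gmin l)) := by
  induction l generalizing seen with
  | nil =>
      simp [pickAll, keysOf, PySem.List.dedup]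
  | cons p rest ih =>
      rcases List.pairwise_cons.mp hs with ⟨hhead, htail⟩
      by_cases hc : PySem.Set.contains seen p.1
      · -- already seen: the head contributes nothing
        have hcm : p.1 ∈ seen := by
          have := PySem.Set.contains_eq_decide seen p.1
          rw [hc] at this; exact of_decide_eq_true this.symm
        have hkeys : (keysOf (p :: rest) seen).Perm (keysOf rest seen) := by
          apply (List.perm_ext_iff_of_nodup (nodup_keysOf _ _) (nodup_keysOf _ _)).mpr
          intro c
          rw [mem_keysOf, mem_keysOf]
          constructor
          · rintro ⟨hmem, hns⟩
            rcases List.mem_map.mp hmem with ⟨q, hq, hqc⟩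
            rcases List.mem_cons.mp hq with rfl | hq'
            · exact absurd (hqc ▸ hcm) hns
            · exact ⟨List.mem_map.mpr ⟨q, hq', hqc⟩, hns⟩
          · rintro ⟨hmem, hns⟩
            rcases List.mem_map.mp hmem with ⟨q, hq, hqc⟩
            exact ⟨List.mem_map.mpr ⟨q, List.mem_cons_of_mem _ hq, hqc⟩, hns⟩
        have hg : ∀ c ∈ keysOf (p :: rest) seen, gmin (p :: rest) c = gmin rest c := by
          intro c hck
          rcases (mem_keysOf _ _ _).mp hck with ⟨_, hns⟩
          have hne : (p.1 == c) = false := by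
            simp only [beq_eq_false_iff_ne, ne_eq]
            rintro rfl; exact hns hcm
          unfold gmin
          simp [hne]
        have e1 : pickAll (p :: rest) seen = pickAll rest seen := by
          simp only [pickAll, hc, ite_true]
        have e2 : (keysOf (p :: rest) seen).map (gmin (p :: rest))
            = (keysOf (p :: rest) seen).map (gmin rest) := List.map_congr_left hg
        rw [e1, e2]
        exact (ih seen htail).trans (hkeys.map _).symm
      · -- new category: the head is its category's minimum (the list is sorted by snd)
        have hcm : p.1 ∉ seen := by
          intro hmem
          exact hc (by rw [PySem.Set.contains_eq_decide]; exact decide_eq_true hmem)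
        have hkeys : (keysOf (p :: rest) seen).Perm (p.1 :: keysOf rest (PySem.Set.add seen p.1)) := by
          apply (List.perm_ext_iff_of_nodup (nodup_keysOf _ _) ?_).mpr
          · intro c
            rw [mem_keysOf, List.mem_cons, mem_keysOf, PySem.Set.mem_add]
            constructor
            · rintro ⟨hmem, hns⟩
              by_cases hcc : c = p.1
              · exact Or.inl hcc
              · rcases List.mem_map.mp hmem with ⟨q, hq, hqc⟩
                rcases List.mem_cons.mp hq with rfl | hq'
                · exact absurd hqc.symm hcc
                · exact Or.inr ⟨List.mem_map.mpr ⟨q, hq', hqc⟩, by tauto⟩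
            · rintro (rfl | ⟨hmem, hns⟩)
              · exact ⟨List.mem_map.mpr ⟨p, List.mem_cons_self, rfl⟩, hcm⟩
              · rcases List.mem_map.mp hmem with ⟨q, hq, hqc⟩
                exact ⟨List.mem_map.mpr ⟨q, List.mem_cons_of_mem _ hq, hqc⟩, fun h => hns (Or.inl h)⟩
          · constructor
            · intro c hck hceq
              rcases (mem_keysOf _ _ _).mp hck with ⟨_, hns⟩
              exact hns ((PySem.Set.mem_add _ _ _).mpr (Or.inr hceq.symm))
            · exact nodup_keysOf _ _
        have hghead : gmin (p :: rest) p.1 = p.2 := by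
          unfold gmin
          rw [List.filter_cons]
          simp only [beq_self_eq_true, if_pos, List.map_cons, PySem.List.min?_id_cons,
            Option.getD_some]
          rcases PySem.List.foldl_min_mem ((rest.filter (fun q => q.1 == p.1)).map (fun q => q.2)) p.2
            with h1 | h1
          · exact h1
          · refine le_antisymm (PySem.List.foldl_min_le _ _).1 ?_
            rcases List.mem_map.mp h1 with ⟨q, hq, hqv⟩
            exact hqv ▸ hhead q (List.mem_of_mem_filter hq)
        have hg : ∀ c ∈ keysOf rest (PySem.Set.add seen p.1), gmin (p :: rest) c = gmin rest c := by
          intro c hck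
          rcases (mem_keysOf _ _ _).mp hck with ⟨_, hns⟩
          have hne : (p.1 == c) = false := by
            simp only [beq_eq_false_iff_ne, ne_eq]
            rintro rfl; exact hns ((PySem.Set.mem_add _ _ _).mpr (Or.inr rfl))
          unfold gmin
          simp [hne]
        have e1 : pickAll (p :: rest) seen = p.2 :: pickAll rest (PySem.Set.add seen p.1) := by
          simp only [pickAll, hc, Bool.false_eq_true, ite_false]
        have e2 : (p.1 :: keysOf rest (PySem.Set.add seen p.1)).map (gmin (p :: rest))
            = p.2 :: (keysOf rest (PySem.Set.add seen p.1)).map (gmin rest) := by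
          rw [List.map_cons, hghead, List.map_congr_left hg]
        have h2 : ((keysOf (p :: rest) seen).map (gmin (p :: rest))).Perm
            (p.2 :: (keysOf rest (PySem.Set.add seen p.1)).map (gmin rest)) := by
          rw [← e2]; exact hkeys.map _
        rw [e1]
        exact ((ih _ htail).cons p.2).trans h2.symm

-- the value min(xs) is invariant under permutation
theorem minv_perm (l₁ l₂ : List Int) (hp : l₁.Perm l₂) :
    (PySem.List.min? l₁ (fun y => y)).getD 0 = (PySem.List.min? l₂ (fun y => y)).getD 0 := by
  rcases h1 : PySem.List.min? l₁ (fun y => y) with _ | m₁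
  · have hnil : l₁ = [] := (PySem.List.min?_eq_none_iff _ _).mp h1
    subst hnil
    rw [← hp.nil_eq]
    rfl
  · rcases h2 : PySem.List.min? l₂ (fun y => y) with _ | m₂
    · have hnil : l₂ = [] := (PySem.List.min?_eq_none_iff _ _).mp h2
      subst hnil
      rw [hp.eq_nil] at h1
      rw [show PySem.List.min? ([] : List Int) (fun y => y) = none from rfl] at h1
      cases h1
    · simp only [Option.getD_some]
      exact le_antisymm
        (PySem.List.min?_isMin h1 m₂ (hp.symm.subset (PySem.List.min?_mem h2)))
        (PySem.List.min?_isMin h2 m₁ (hp.subset (PySem.List.min?_mem h1)))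

-- ===== VERDICT (by name: the statement is the Claim_ definition above) =====
theorem solve_spec : Claim_equal_solve := by
  intro n_items k_distinct dish cook _ hpre
  unfold Spec_solve solve solve_alt
  by_cases hlt : ((PySem.Set.ofList dish).length : Int) < k_distinct
  · simp only [if_pos hlt]
  · simp only [if_neg hlt]
    have hkle : k_distinct ≤ ((PySem.Set.ofList ((dish.zip cook).map (fun p => p.1))).length : Int) := by
      rcases hpre with h | h
      · exact absurd h hlt
      · exact h
    set L := dish.zip cook with hLdef
    set S := PySem.List.sorted L (fun p => p.2) with hSdef
    set menu : PySem.Dict Int Int :=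
      L.foldl (fun d p => d.insert p.1 (match d.get? p.1 with
                                        | none => p.2
                                        | some v => min v p.2)) PySem.Dict.empty with hmenu
    have hkeys : menu.keys = PySem.Set.ofList (L.map (fun p => p.1)) := by
      have h := PySem.Dict.keys_foldl_insert_key (ν := Int) L (fun p => p.1)
        (fun d p => match d.get? p.1 with | none => p.2 | some v => min v p.2) PySem.Dict.empty
      simp only [PySem.Dict.keys_empty, PySem.Set.update_nil_left] at h
      exact h
    have hnd : menu.keys.Nodup := by
      rw [hmenu]
      exact PySem.Dict.nodup_keys_foldl_insert_key L (fun p => p.1) _ _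
        (by rw [PySem.Dict.keys_empty]; exact List.nodup_nil)
    have hitems : menu.items = menu.keys.map (fun c => (c, menu.getD c 0)) :=
      PySem.Dict.items_eq_map_keys menu hnd 0
    -- A's sorted values are the sorted per-category minima
    have hvals : menu.items.map (fun p => p.2) = menu.keys.map (gmin L) := by
      rw [hitems, List.map_map]
      refine List.map_congr_left (fun c hcmem => ?_)
      have hc : c ∈ L.map (fun p => p.1) := by
        rw [hkeys] at hcmem
        exact (PySem.Set.mem_ofList _ _).mp hcmem
      simpa using getD_min L c hc
    -- B's picked values are exactly the sorted per-category minima, as a list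
    have hSperm : S.Perm L := PySem.List.sorted_perm L (fun p => p.2) false
    have hpick : pickAll S PySem.Set.empty
        = PySem.List.sorted (menu.keys.map (gmin L)) (fun y => y) := by
      apply PySem.List.eq_of_perm_of_pairwise_le
      · -- permutation
        refine (pickAll_perm S PySem.Set.empty (PySem.List.sorted_pairwise L (fun p => p.2))).trans ?_
        refine List.Perm.trans ?_ (PySem.List.sorted_perm _ _ false).symm
        have hkperm : (keysOf S PySem.Set.empty).Perm menu.keys := by
          apply (List.perm_ext_iff_of_nodup (nodup_keysOf _ _) hnd).mpr
          intro c
          rw [mem_keysOf, hkeys, PySem.Set.mem_ofList]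
          constructor
          · rintro ⟨hmem, _⟩
            exact (hSperm.map (fun p => p.1)).subset hmem
          · intro hmem
            exact ⟨(hSperm.map (fun p => p.1)).symm.subset hmem, by simp [PySem.Set.empty]⟩
        have hgm : ∀ c ∈ keysOf S PySem.Set.empty, gmin S c = gmin L c := by
          intro c _
          exact minv_perm _ _ ((hSperm.filter _).map _)
        rw [List.map_congr_left hgm]
        exact hkperm.map _
      · -- pickAll of a snd-sorted list is nondecreasing: it is a sublist of the sorted snds
        exact List.Pairwise.sublist (pickAll_sublist S PySem.Set.empty)
          (by rw [hSdef, sorted_map_snd]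
              rw [List.pairwise_iff_getElem]
              intro i j hi hj hij
              exact PySem.List.sorted_id_getElem_mono _ (le_of_lt hij) hj)
      · -- sorted is nondecreasing
        rw [List.pairwise_iff_getElem]
        intro i j hi hj hij
        exact PySem.List.sorted_id_getElem_mono _ (le_of_lt hij) hj
    -- lengths
    have hlen : (PySem.List.sorted menu.items (fun x => x.2)).length = menu.keys.length := by
      rw [(PySem.List.sorted_perm menu.items (fun x => x.2) false).length_eq, hitems, List.length_map]
    have hklen : k_distinct ≤ (menu.keys.length : Int) := by rw [hkeys]; exact hkle
    -- A's loop
    have hA : (PySem.List.pyRange 0 k_distinct 1).foldl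
        (fun result i => result +
          ((PySem.List.pyGet? (PySem.List.sorted menu.items (fun x => x.2)) i).map (fun p => p.2)).getD 0) 0
        = (((PySem.List.sorted menu.items (fun x => x.2)).take k_distinct.toNat).map (fun p => p.2)).sum := by
      by_cases hk : 0 < k_distinct
      · have hcast : k_distinct = ((k_distinct.toNat : Nat) : Int) := by omega
        rw [hcast]
        exact rangeSum _ k_distinct.toNat (by omega)
      · rw [pyRange_nonpos (by omega)]
        have : k_distinct.toNat = 0 := by omega
        simp [this]
    rw [hA, scanPick_eq, hpick, List.map_take, sorted_map_snd, hvals]
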